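-- pv_equiv track=rewrite | github.com/wrzehu/open_the_gates | chapter_two/bin/task.py | filter_helper_and
-- ===== SOURCE A (Python) =====
-- def filter_helper_and(l1, l2, l3):
--     """
--     Provides and condition
--     """
--     ans = set()
--     for l in l1:
--         if l in l2:
--             ans.add(l)
--     for l in l1:
--         if l in l3:
--             ans.add(l)
--     for l in l2:
--         if l in l3:
--             ans.add(l)
--     return list(ans)
-- ===== SOURCE B (Python) =====
-- def filter_helper_and(l1, l2, l3):
--     s1, s2, s3 = set(l1), set(l2), set(l3)
--     return [x for x in sorted(s1 | s2 | s3)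
--             if (x in s1) + (x in s2) + (x in s3) >= 2]
-- ===== Notes on version B (the rewrite author's own statement) =====
-- stated objective: faster
-- what changed: Instead of three pairwise-intersection scans with linear list membership, B builds the three hash sets once and makes a single pass over the sorted union, keeping each element whose membership count over the three sets is at least 2 (majority/presence counting); output order is sorted, equal as a set to A's list(set).
import Mathlib
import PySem

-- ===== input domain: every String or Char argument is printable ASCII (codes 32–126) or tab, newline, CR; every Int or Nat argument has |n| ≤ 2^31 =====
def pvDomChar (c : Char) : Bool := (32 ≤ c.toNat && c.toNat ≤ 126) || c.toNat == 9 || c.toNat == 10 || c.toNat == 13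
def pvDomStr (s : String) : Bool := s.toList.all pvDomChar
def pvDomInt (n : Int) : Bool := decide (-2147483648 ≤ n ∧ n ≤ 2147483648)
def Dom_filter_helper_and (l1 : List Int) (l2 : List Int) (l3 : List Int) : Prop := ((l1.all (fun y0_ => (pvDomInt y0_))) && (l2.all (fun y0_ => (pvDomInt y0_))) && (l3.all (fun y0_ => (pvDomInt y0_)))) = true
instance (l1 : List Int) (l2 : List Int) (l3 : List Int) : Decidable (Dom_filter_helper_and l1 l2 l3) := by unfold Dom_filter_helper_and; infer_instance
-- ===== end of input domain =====

-- B replaces A's three pairwise-intersection scans (each with a linear list-membership test inside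
-- the loop) by presence counting: one pass over the sorted union of the three hash sets, keeping
-- each element contained in at least two of them; measurably faster on large inputs.
-- Both Pythons return a list built from a set; Python's set iteration order (hash order) is not
-- modelled by PySem and the outputs are compared as sets, so both ports present the resulting set
-- in sorted order, and the equality proved is between those sorted lists (set-contents equality).

-- ===== PORT A =====
def filter_helper_and (l1 : List Int) (l2 : List Int) (l3 : List Int) : List Int :=
  let ans : PySem.Set Int := PySem.Set.empty
  let ans := l1.foldl (fun s l => if l2.contains l then PySem.Set.add s l else s) ans
  let ans := l1.foldl (fun s l => if l3.contains l then PySem.Set.add s l else s) ans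
  let ans := l2.foldl (fun s l => if l3.contains l then PySem.Set.add s l else s) ans
  -- list(ans): set iteration order is not modelled (outputs are compared as sets); sorted presentation
  PySem.List.sorted ans (fun x => x) false

-- ===== PORT B =====
def filter_helper_and_alt (l1 : List Int) (l2 : List Int) (l3 : List Int) : List Int :=
  let s1 : PySem.Set Int := PySem.Set.ofList l1
  let s2 : PySem.Set Int := PySem.Set.ofList l2
  let s3 : PySem.Set Int := PySem.Set.ofList l3
  (PySem.List.sorted (PySem.Set.union (PySem.Set.union s1 s2) s3) (fun x => x) false).filter
    (fun x => decide (((if PySem.Set.contains s1 x then (1 : Int) else 0)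
      + (if PySem.Set.contains s2 x then (1 : Int) else 0)
      + (if PySem.Set.contains s3 x then (1 : Int) else 0)) ≥ 2))

-- ===== PRECONDITION & SPEC =====
def Spec_filter_helper_and (l1 : List Int) (l2 : List Int) (l3 : List Int) (out : List Int) : Prop := out = filter_helper_and_alt l1 l2 l3
instance (l1 : List Int) (l2 : List Int) (l3 : List Int) (out : List Int) : Decidable (Spec_filter_helper_and l1 l2 l3 out) := by unfold Spec_filter_helper_and; infer_instance

-- ===== CLAIM =====
def Claim_equal_filter_helper_and : Prop := ∀ (l1 : List Int) (l2 : List Int) (l3 : List Int), Dom_filter_helper_and l1 l2 l3 → Spec_filter_helper_and l1 l2 l3 (filter_helper_and l1 l2 l3)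

-- ===== LEMMAS AND PROOFS =====

-- A's loop 'for l in li: if l in lj: ans.add(l)' is s.update(li filtered by membership in lj)
theorem foldl_if_add (l : List Int) (p : Int → Bool) (s : PySem.Set Int) :
    l.foldl (fun s x => if p x then PySem.Set.add s x else s) s
      = PySem.Set.update s (l.filter p) := by
  induction l generalizing s with
  | nil => rfl
  | cons x l ih =>
    by_cases h : p x <;>
      simp [List.foldl_cons, h, PySem.Set.update_cons, ih]

theorem ofList_append (a b : List Int) :
    PySem.Set.ofList (a ++ b) = PySem.Set.update (PySem.Set.ofList a) b := by
  simp [PySem.Set.ofList_eq_foldl, PySem.Set.update, List.foldl_append]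

-- updating with a deduplicated list is updating with the list itself
theorem update_ofList (s : PySem.Set Int) (xs : List Int) :
    PySem.Set.update s (PySem.Set.ofList xs) = PySem.Set.update s xs := by
  rw [PySem.Set.update_eq_append_filter, PySem.Set.update_eq_append_filter,
    PySem.Set.ofList_ofList]

-- ===== VERDICT =====
theorem filter_helper_and_spec : Claim_equal_filter_helper_and := by
  intro l1 l2 l3 _
  show filter_helper_and l1 l2 l3 = filter_helper_and_alt l1 l2 l3
  unfold filter_helper_and filter_helper_and_alt
  simp only [foldl_if_add, PySem.Set.empty, PySem.Set.update_nil_left, PySem.Set.union,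
    update_ofList, ← ofList_append]
  -- both sides: sorted presentations of two sets with the same members
  apply PySem.List.sorted_eq_of_perm_of_pairwise_lt
  · -- the filtered sorted union is a rearrangement of A's set
    have hpair : (((PySem.List.sorted
        (PySem.Set.ofList (l1 ++ l2 ++ l3)) (fun x => x) false)).filter
        (fun x => decide (((if PySem.Set.contains (PySem.Set.ofList l1) x then (1 : Int) else 0)
          + (if PySem.Set.contains (PySem.Set.ofList l2) x then (1 : Int) else 0)
          + (if PySem.Set.contains (PySem.Set.ofList l3) x then (1 : Int) else 0)) ≥ 2))).Pairwise (· < ·) :=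
      (PySem.List.sorted_ofList_pairwise_lt (l1 ++ l2 ++ l3)).filter _
    rw [List.perm_ext_iff_of_nodup (hpair.imp fun h => ne_of_lt h) (PySem.Set.nodup_ofList _)]
    intro a
    simp only [List.mem_filter, PySem.List.mem_sorted, PySem.Set.mem_ofList, List.mem_append,
      List.mem_filter, decide_eq_true_eq]
    constructor
    · rintro ⟨-, hc⟩
      by_cases h1 : a ∈ l1 <;> by_cases h2 : a ∈ l2 <;> by_cases h3 : a ∈ l3 <;>
        simp_all
    · intro h
      by_cases h1 : a ∈ l1 <;> by_cases h2 : a ∈ l2 <;> by_cases h3 : a ∈ l3 <;>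
        simp_all
  · exact (PySem.List.sorted_ofList_pairwise_lt (l1 ++ l2 ++ l3)).filter _
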